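-- pv_equiv track=rewrite | github.com/yanb514/I24-postprocessing | utils/data_structures.py | pretty_path
-- ===== SOURCE A (Python) =====
-- def pretty_path(path):
--     '''
--     get rid of "-pre, -post" in paths and remove duplicate ids
--     '''
--     p = []
--     i = 0
--     prev_id = ""
--     # for i, node in enumerate(path[:-1]):
--     while i < len(path)-1:
--         if path[i] not in {"s", "t"}:
--             id = path[i].partition("-")[0]
--             if id != prev_id:
--                 p.append(id)
--                 prev_id = id
--         i += 1
--     return p
-- ===== SOURCE B (Python) =====
-- def pretty_path(path):
--     ids = [node.partition('-')[0] for node in path[:-1] if node not in {'s', 't'}]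
--     return [x for prev, x in zip([''] + ids, ids) if x != prev]
-- ===== Notes on version B (the rewrite author's own statement) =====
-- stated objective: idiomatic
-- what changed: Replaces A's index-driven while loop with explicit prev_id state by a filter/strip comprehension followed by a zip-with-predecessor comprehension that keeps each id differing from the one before it (empty predecessor for the first).
import Mathlib
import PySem

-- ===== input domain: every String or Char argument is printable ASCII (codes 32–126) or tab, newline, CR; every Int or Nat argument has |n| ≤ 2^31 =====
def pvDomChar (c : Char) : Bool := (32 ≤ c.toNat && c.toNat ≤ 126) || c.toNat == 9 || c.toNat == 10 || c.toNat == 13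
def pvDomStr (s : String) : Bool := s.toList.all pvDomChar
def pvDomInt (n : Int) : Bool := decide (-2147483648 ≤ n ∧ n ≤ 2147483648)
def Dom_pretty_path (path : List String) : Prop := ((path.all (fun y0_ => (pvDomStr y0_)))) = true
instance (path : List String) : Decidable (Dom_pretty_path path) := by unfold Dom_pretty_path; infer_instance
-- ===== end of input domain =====

-- B replaces A's index/while loop with explicit prev_id state by a filter/strip pass followed
-- by a zip-with-predecessor pass keeping each id that differs from the one before it (idiomatic).


-- ===== PORT A =====
-- node.partition("-")[0]: the part of the string before the first '-' (exact for any string)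
def pvHeadId (s : String) : String := String.ofList (s.toList.takeWhile (fun c => c ≠ '-'))

-- path[i] not in {"s", "t"}
def pvKeep (node : String) : Bool := ¬ (node = "s" ∨ node = "t")

-- A's while loop over i < len(path)-1 (i.e. over path[:-1]) with state (p, prev_id)
def prettyLoopA : List String → List String → String → List String
  | [], p, _ => p
  | node :: rest, p, prev_id =>
    if pvKeep node then
      let id := pvHeadId node
      if id ≠ prev_id then prettyLoopA rest (p ++ [id]) id
      else prettyLoopA rest p prev_id
    else prettyLoopA rest p prev_id

def pretty_path (path : List String) : List String := prettyLoopA path.dropLast [] ""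

-- ===== PORT B =====
def pretty_path_alt (path : List String) : List String :=
  let ids := (path.dropLast.filter pvKeep).map pvHeadId
  -- [x for prev, x in zip([''] + ids, ids) if x != prev]
  ((("" :: ids).zip ids).filter (fun px => px.2 ≠ px.1)).map (fun px => px.2)

-- ===== PRECONDITION & SPEC =====
def Spec_pretty_path (path : List String) (out : List String) : Prop := out = pretty_path_alt path
instance (path : List String) (out : List String) : Decidable (Spec_pretty_path path out) := by
  unfold Spec_pretty_path; infer_instance

-- ===== CLAIM (what is proved, stated in full; the proofs are below) =====
def Claim_equal_pretty_path : Prop :=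
  ∀ (path : List String), Dom_pretty_path path → Spec_pretty_path path (pretty_path path)

-- ===== LEMMAS AND PROOFS =====

-- A's state machine with the accumulated prefix factored out
def pvDedup (prev : String) : List String → List String
  | [] => []
  | x :: xs => if x ≠ prev then x :: pvDedup x xs else pvDedup prev xs

theorem prettyLoopA_eq_dedup :
    ∀ (l p : List String) (prev : String),
      prettyLoopA l p prev = p ++ pvDedup prev ((l.filter pvKeep).map pvHeadId) := by
  intro l
  induction l with
  | nil => intro p prev; simp [prettyLoopA, pvDedup]
  | cons node rest ih =>
    intro p prev
    by_cases hst : pvKeep node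
    · by_cases hid : pvHeadId node = prev
      · simp [prettyLoopA, hst, hid, ih, List.filter_cons, pvDedup]
      · simp [prettyLoopA, hst, hid, ih, List.filter_cons, pvDedup]
    · simp [prettyLoopA, hst, ih, List.filter_cons]

-- the state machine = keep each element that differs from its predecessor (prev pads the front);
-- key fact: after processing x the state equals x whether or not x was appended
theorem pvDedup_eq_zip_pred :
    ∀ (xs : List String) (prev : String),
      pvDedup prev xs =
        (((prev :: xs).zip xs).filter (fun px => px.2 ≠ px.1)).map (fun px => px.2) := by
  intro xs
  induction xs with
  | nil => intro prev; rfl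
  | cons x ys ih =>
    intro prev
    by_cases h : x = prev
    · simp [pvDedup, List.zip, h]
      simpa using ih prev
    · simp [pvDedup, List.zip, h]
      simpa using ih x

-- ===== VERDICT (by name: the statement is the Claim_ definition above) =====
theorem pretty_path_spec : Claim_equal_pretty_path := by
  intro path _
  show pretty_path path = pretty_path_alt path
  unfold pretty_path pretty_path_alt
  rw [prettyLoopA_eq_dedup]
  simpa using pvDedup_eq_zip_pred ((path.dropLast.filter pvKeep).map pvHeadId) ""
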